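-- pv_equiv track=rewrite | github.com/Memonto-Mori/Algorimto-VLC-de-procesamiento | Grafica_invernadero.py | calculate_on_off_durations
-- ===== SOURCE A (Python) =====
-- def calculate_on_off_durations(on_off_states, times):
--     durations = []
--     last_change_time = None
--     current_state = None
--
--     for i in range(len(on_off_states)):
--         if current_state is None or on_off_states[i] != current_state:
--             # Detectar un cambio de estado
--             if last_change_time is not None:
--                 # Calcular la duración entre estados
--                 durations.append((current_state, times[i] - last_change_time))
--             # Actualizar el estado y tiempo del último cambio
--             current_state = on_off_states[i]
--             last_change_time = times[i]
--
--     return durations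
-- ===== SOURCE B (Python) =====
-- def calculate_on_off_durations(on_off_states, times):
--     # Boundary indices: a change happens at 0 and wherever the state differs
--     # from its predecessor (A's current_state always equals the previous state).
--     changes = [i for i in range(len(on_off_states))
--                if i == 0 or on_off_states[i] != on_off_states[i - 1]]
--     return [(on_off_states[i], times[j] - times[i])
--             for i, j in zip(changes, changes[1:])]
-- ===== Notes on version B (the rewrite author's own statement) =====
-- stated objective: alternative
-- what changed: B replaces A's stateful scan (current_state/last_change_time accumulators) by a stateless adjacent-index comparison: it first lists the change indices (i==0 or states[i]!=states[i-1]), then maps consecutive index pairs to (state, time difference).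
import Mathlib
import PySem

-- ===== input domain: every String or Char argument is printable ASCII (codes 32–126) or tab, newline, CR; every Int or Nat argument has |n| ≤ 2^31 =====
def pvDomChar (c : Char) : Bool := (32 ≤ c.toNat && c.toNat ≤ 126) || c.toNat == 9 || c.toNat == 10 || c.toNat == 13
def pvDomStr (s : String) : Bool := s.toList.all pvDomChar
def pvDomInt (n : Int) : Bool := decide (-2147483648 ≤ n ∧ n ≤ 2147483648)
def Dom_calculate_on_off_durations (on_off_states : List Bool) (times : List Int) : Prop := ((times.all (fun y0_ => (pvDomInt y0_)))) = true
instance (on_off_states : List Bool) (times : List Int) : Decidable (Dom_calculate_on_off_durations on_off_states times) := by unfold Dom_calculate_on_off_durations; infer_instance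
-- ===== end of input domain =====

-- B replaces A's stateful scan by a stateless two-stage computation: list the change
-- indices by adjacent comparison, then map consecutive index pairs to durations.
-- Equivalence of the RETURN values is proved on Pre_ (inputs where Python A does not raise IndexError on times[i]).

-- ===== PORT A =====
-- one loop iteration of A: state = (durations, last_change_time, current_state)
def cooA_step (on_off_states : List Bool) (times : List Int)
    (acc : List (Bool × Int) × Option Int × Option Bool) (i : Nat) :
    List (Bool × Int) × Option Int × Option Bool :=
  match acc with
  | (durations, last_change_time, current_state) =>
    if current_state = none ∨ some (on_off_states.getD i false) ≠ current_state then
      let durations' :=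
        match last_change_time with
        | some lt => durations ++ [(current_state.getD false, times.getD i 0 - lt)]
        | none => durations
      (durations', some (times.getD i 0), some (on_off_states.getD i false))
    else (durations, last_change_time, current_state)

def calculate_on_off_durations (on_off_states : List Bool) (times : List Int) : List (Bool × Int) :=
  ((List.range on_off_states.length).foldl (cooA_step on_off_states times) ([], none, none)).1

-- ===== PORT B =====
-- stage 1: the change indices (comprehension with adjacent comparison)
def cooB_changes (s : List Bool) : List Nat :=
  (List.range s.length).filter (fun i => i == 0 || s.getD i false != s.getD (i - 1) false)

-- stage 2: consecutive index pairs -> (state at earlier index, time difference)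
def calculate_on_off_durations_alt (on_off_states : List Bool) (times : List Int) : List (Bool × Int) :=
  ((cooB_changes on_off_states).zip (cooB_changes on_off_states).tail).map
    (fun p => (on_off_states.getD p.1 false, times.getD p.2 0 - times.getD p.1 0))

-- ===== PRECONDITION & SPEC =====
-- Pre_ excludes exactly the inputs where Python A raises IndexError: times must be long
-- enough at every state-change index (index 0, and every i where the state differs from its predecessor).
def Pre_calculate_on_off_durations (on_off_states : List Bool) (times : List Int) : Prop :=
  ∀ i, i < on_off_states.length →
    (i = 0 ∨ on_off_states.getD i false ≠ on_off_states.getD (i - 1) false) → i < times.length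
instance (on_off_states : List Bool) (times : List Int) : Decidable (Pre_calculate_on_off_durations on_off_states times) := by unfold Pre_calculate_on_off_durations; infer_instance

def pvWitness_calculate_on_off_durations : List Bool × List Int := ([true, false], [0, 5])

def Spec_calculate_on_off_durations (on_off_states : List Bool) (times : List Int) (out : List (Bool × Int)) : Prop := out = calculate_on_off_durations_alt on_off_states times
instance (on_off_states : List Bool) (times : List Int) (out : List (Bool × Int)) : Decidable (Spec_calculate_on_off_durations on_off_states times out) := by unfold Spec_calculate_on_off_durations; infer_instance

-- ===== CLAIM (what is proved, stated in full; the proofs are below) =====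
def Claim_equal_calculate_on_off_durations : Prop := ∀ (on_off_states : List Bool) (times : List Int), Dom_calculate_on_off_durations on_off_states times → Pre_calculate_on_off_durations on_off_states times → Spec_calculate_on_off_durations on_off_states times (calculate_on_off_durations on_off_states times)

-- ===== LEMMAS AND PROOFS =====

-- change indices of the first n positions
def cooIdxs (s : List Bool) (n : Nat) : List Nat :=
  (List.range n).filter (fun i => i == 0 || s.getD i false != s.getD (i - 1) false)

def cooPairs (s : List Bool) (t : List Int) (l : List Nat) : List (Bool × Int) :=
  (l.zip l.tail).map (fun p => (s.getD p.1 false, t.getD p.2 0 - t.getD p.1 0))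

lemma cooPairs_append (s : List Bool) (t : List Int) (l : List Nat) (x : Nat) :
    cooPairs s t (l ++ [x]) = cooPairs s t l ++
      (match l.getLast? with
       | none => []
       | some q => [(s.getD q false, t.getD x 0 - t.getD q 0)]) := by
  induction l with
  | nil => simp [cooPairs]
  | cons a l ih =>
    cases l with
    | nil => simp [cooPairs]
    | cons b l' =>
      simp only [List.cons_append, List.getLast?_cons_cons]
      have hstep : ∀ xs, cooPairs s t (a :: b :: xs) =
          (s.getD a false, t.getD b 0 - t.getD a 0) :: cooPairs s t (b :: xs) := by
        intro xs; simp [cooPairs]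
      rw [show a :: b :: (l' ++ [x]) = a :: (b :: (l' ++ [x])) from rfl]
      rw [show (b :: l') ++ [x] = b :: (l' ++ [x]) from rfl] at ih
      rw [hstep (l' ++ [x]), ih, hstep l']
      cases (b :: l').getLast? <;> simp

-- the invariant: A's fold state after n iterations, expressed via the change indices
def cooInv (s : List Bool) (t : List Int)
    (a : List (Bool × Int) × Option Int × Option Bool) (n : Nat) : Prop :=
  a.1 = cooPairs s t (cooIdxs s n) ∧
  ((n = 0 ∧ cooIdxs s n = [] ∧ a.2.1 = none ∧ a.2.2 = none) ∨
   (1 ≤ n ∧ ∃ q, (cooIdxs s n).getLast? = some q ∧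
      a.2.1 = some (t.getD q 0) ∧ a.2.2 = some (s.getD q false) ∧
      s.getD q false = s.getD (n - 1) false))

lemma cooIdxs_succ (s : List Bool) (n : Nat) :
    cooIdxs s (n + 1) =
      cooIdxs s n ++ (if n = 0 ∨ s.getD n false ≠ s.getD (n - 1) false then [n] else []) := by
  unfold cooIdxs
  rw [List.range_succ, List.filter_append]
  by_cases hn : n = 0
  · simp [hn]
  · by_cases hc : s.getD n false = s.getD (n - 1) false
    · simp only [List.getD] at hc
      simp [hn, hc]
    · simp only [List.getD] at hc
      simp [hn, hc]

lemma cooInv_step (s : List Bool) (t : List Int)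
    (a : List (Bool × Int) × Option Int × Option Bool) (n : Nat)
    (h : cooInv s t a n) : cooInv s t (cooA_step s t a n) (n + 1) := by
  obtain ⟨durs, last, cur⟩ := a
  obtain ⟨h1, h2⟩ := h
  simp only at h1
  subst h1
  rcases h2 with ⟨hn, hidx, hl, hc⟩ | ⟨hn, q, hq, hl, hc, hprev⟩
  · -- n = 0 : first iteration, a change, nothing appended
    subst hn
    simp only at hl hc; subst hl; subst hc
    have hres : cooA_step s t (cooPairs s t (cooIdxs s 0), none, none) 0
        = ([], some (t.getD 0 0), some (s.getD 0 false)) := by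
      simp [cooA_step, cooIdxs, cooPairs]
    have hidx1 : cooIdxs s 1 = [0] := by
      rw [show (1 : Nat) = 0 + 1 from rfl, cooIdxs_succ, if_pos (Or.inl rfl)]
      simp [cooIdxs]
    rw [hres]
    exact ⟨by simp [hidx1, cooPairs], Or.inr ⟨le_refl 1, 0, by rw [hidx1]; rfl, rfl, rfl, rfl⟩⟩
  · -- n ≥ 1 : current_state = states[n-1] (via the last change index q)
    simp only at hl hc; subst hl; subst hc
    have hn0 : n ≠ 0 := by omega
    by_cases hch : s.getD n false = s.getD (n - 1) false
    · -- no change: state unchanged, no new index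
      have hcond : ¬ ((some (s.getD q false) : Option Bool) = none ∨
          some (s.getD n false) ≠ some (s.getD q false)) := by
        rintro (h | h)
        · exact Option.some_ne_none _ h
        · exact h (by rw [hch, ← hprev])
      have hres : cooA_step s t (cooPairs s t (cooIdxs s n), some (t.getD q 0), some (s.getD q false)) n
          = (cooPairs s t (cooIdxs s n), some (t.getD q 0), some (s.getD q false)) := by
        simp only [cooA_step]; rw [if_neg hcond]
      have hidx1 : cooIdxs s (n + 1) = cooIdxs s n := by
        rw [cooIdxs_succ, if_neg (by rintro (h | h); exacts [hn0 h, h hch])]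
        simp
      rw [hres]
      exact ⟨by rw [hidx1], Or.inr ⟨by omega, q, by rw [hidx1]; exact hq, rfl, rfl,
        hprev.trans hch.symm⟩⟩
    · -- change at n: append a duration, index n becomes the last change
      have hcond : ((some (s.getD q false) : Option Bool) = none ∨
          some (s.getD n false) ≠ some (s.getD q false)) :=
        Or.inr fun h => hch ((Option.some.inj h).trans hprev)
      have hres : cooA_step s t (cooPairs s t (cooIdxs s n), some (t.getD q 0), some (s.getD q false)) n
          = (cooPairs s t (cooIdxs s n) ++ [(s.getD q false, t.getD n 0 - t.getD q 0)],
             some (t.getD n 0), some (s.getD n false)) := by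
        simp only [cooA_step]; rw [if_pos hcond]; rfl
      have hidx1 : cooIdxs s (n + 1) = cooIdxs s n ++ [n] := by
        rw [cooIdxs_succ, if_pos (Or.inr hch)]
      rw [hres]
      refine ⟨?_, Or.inr ⟨by omega, n, ?_, rfl, rfl, rfl⟩⟩
      · rw [hidx1, cooPairs_append, hq]
      · rw [hidx1]; simp

lemma cooInv_foldl (s : List Bool) (t : List Int) (n : Nat) :
    cooInv s t ((List.range n).foldl (cooA_step s t) ([], none, none)) n := by
  induction n with
  | zero => exact ⟨by simp [cooPairs, cooIdxs], Or.inl ⟨rfl, by simp [cooIdxs], rfl, rfl⟩⟩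
  | succ n ih =>
    rw [List.range_succ, List.foldl_append]
    simpa using cooInv_step s t _ n ih

-- ===== VERDICT (by name: the statement is the Claim_ definition above) =====
theorem calculate_on_off_durations_spec : Claim_equal_calculate_on_off_durations := by
  intro s t _ _
  unfold Spec_calculate_on_off_durations calculate_on_off_durations calculate_on_off_durations_alt
  have h := (cooInv_foldl s t s.length).1
  simpa [cooB_changes, cooIdxs, cooPairs] using h
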